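-- pv_equiv track=rewrite | github.com/embydextrous/Interview | arrays/rotationsAndReversals/7-findPairSumInSortedAndRotatedArray.py | findPairSum
-- ===== SOURCE A (Python) =====
-- def findPairSum(a, s):
--     n = len(a)
--     pivot = findPivot(a, 0, n - 1)
--     l, r = pivot + 1, pivot % n # Mod N if pivot is -1
--     while l != r:
--         if a[l] + a[r] == s:
--             return (l, r)
--         if a[l] + a[r] < s:
--             l = (l + 1) % n
--         else:
--             r = (r - 1) % n
--     return (-1, -1)
--
-- def findPivot(a, l, r):
--     if l > r:
--         return -1
--     m = (l + r) // 2
--     if m < r and a[m+1] < a[m]: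
--         return m
--     if m > l and a[m-1] >  a[m]:
--         return m - 1
--     if a[l] > a[m]:
--         return findPivot(a, l, m - 1)
--     return findPivot(a, m + 1, r)
-- ===== SOURCE B (Python) =====
-- def findPairSum(a, s):
--     n = len(a)
--     # pivot via iterative binary search (same recurrence as A's recursive findPivot)
--     lo, hi, p = 0, n - 1, -1
--     while lo <= hi:
--         m = (lo + hi) // 2
--         if m < hi and a[m + 1] < a[m]:
--             p = m
--             break
--         if m > lo and a[m - 1] > a[m]:
--             p = m - 1
--             break
--         if a[lo] > a[m]:
--             hi = m - 1
--         else: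
--             lo = m + 1
--     # two pointers over LOGICAL positions 0..n-1 of the unrotated array,
--     # mapped to physical indices through (p + 1 + pos) % n
--     i, j = 0, n - 1
--     while i < j:
--         li, rj = (p + 1 + i) % n, (p + 1 + j) % n
--         t = a[li] + a[rj]
--         if t == s:
--             return (li, rj)
--         if t < s:
--             i += 1
--         else:
--             j -= 1
--     return (-1, -1)
-- ===== Notes on version B (the rewrite author's own statement) =====
-- stated objective: alternative
-- what changed: The recursive pivot search becomes an iterative lo/hi binary search, and the circular modular two-pointer scan over physical indices (l,r) is replaced by a plain inward two-pointer scan i<j over logical positions of the unrotated array, mapped to physical indices via (pivot+1+pos) % n.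
-- outside the precondition, e.g. on findPairSum([], 0): A raises ZeroDivisionError, B returns (-1, -1)
import Mathlib
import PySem

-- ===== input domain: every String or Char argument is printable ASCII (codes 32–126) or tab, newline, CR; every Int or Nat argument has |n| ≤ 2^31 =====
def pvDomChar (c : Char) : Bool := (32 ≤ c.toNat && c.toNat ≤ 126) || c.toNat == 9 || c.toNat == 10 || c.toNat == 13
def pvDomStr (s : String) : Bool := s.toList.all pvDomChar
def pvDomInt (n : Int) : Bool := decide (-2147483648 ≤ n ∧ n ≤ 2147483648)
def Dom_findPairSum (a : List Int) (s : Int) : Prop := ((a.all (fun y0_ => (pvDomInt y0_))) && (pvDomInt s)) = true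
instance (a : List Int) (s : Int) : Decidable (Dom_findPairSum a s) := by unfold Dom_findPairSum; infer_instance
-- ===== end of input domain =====

-- B replaces A's recursive pivot search by an iterative binary search and A's circular
-- modular two-pointer loop by a plain inward two-pointer scan over logical positions
-- (objective: alternative decomposition, same cost).

-- ===== PORT A =====
-- a[i] ported as pyGetD _ _ 0: on every input admitted by Pre_ all indices taken are in
-- range (they are results of % n with 0 < n, or pivot indices within [0, n-1]), so the
-- default is never consulted and the port is exact.
def pvFindPivot (a : List Int) (l r : Int) : Int :=
  if hlr : l > r then -1
  else
    let m := PySem.Int.floordiv (l + r) 2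
    if m < r ∧ PySem.List.pyGetD a (m + 1) 0 < PySem.List.pyGetD a m 0 then m
    else if m > l ∧ PySem.List.pyGetD a (m - 1) 0 > PySem.List.pyGetD a m 0 then m - 1
    else if PySem.List.pyGetD a l 0 > PySem.List.pyGetD a m 0 then pvFindPivot a l (m - 1)
    else pvFindPivot a (m + 1) r
termination_by (r + 1 - l).toNat
decreasing_by
  · have := PySem.Int.floordiv_two_mid_bounds (lo := l) (hi := r) (by omega)
    omega
  · have := PySem.Int.floordiv_two_mid_bounds (lo := l) (hi := r) (by omega)
    omega

-- the while loop of A; fuel = len(a) is an upper bound on the iteration count from the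
-- actual initial state (the circular distance (r-l) % n strictly decreases), so the
-- fuel-0 branch is unreachable from findPairSum's call
def pvLoopA (a : List Int) (s n : Int) : Nat → Int → Int → Int × Int
  | 0, _, _ => (-1, -1)
  | fuel + 1, l, r =>
    if l ≠ r then
      if PySem.List.pyGetD a l 0 + PySem.List.pyGetD a r 0 = s then (l, r)
      else if PySem.List.pyGetD a l 0 + PySem.List.pyGetD a r 0 < s then
        pvLoopA a s n fuel (PySem.Int.mod (l + 1) n) r
      else
        pvLoopA a s n fuel l (PySem.Int.mod (r - 1) n)
    else (-1, -1)

def findPairSum (a : List Int) (s : Int) : Int × Int :=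
  let n : Int := a.length
  let pivot := pvFindPivot a 0 (n - 1)
  pvLoopA a s n a.length (pivot + 1) (PySem.Int.mod pivot n)

-- ===== PORT B =====
-- iterative binary search for the pivot (Source B's while lo <= hi loop, ported as the
-- corresponding tail recursion); same pyGetD remark as for port A
def pvPivotIter (a : List Int) (lo hi : Int) : Int :=
  if hlh : lo ≤ hi then
    let m := PySem.Int.floordiv (lo + hi) 2
    if m < hi ∧ PySem.List.pyGetD a (m + 1) 0 < PySem.List.pyGetD a m 0 then m
    else if m > lo ∧ PySem.List.pyGetD a (m - 1) 0 > PySem.List.pyGetD a m 0 then m - 1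
    else if PySem.List.pyGetD a lo 0 > PySem.List.pyGetD a m 0 then pvPivotIter a lo (m - 1)
    else pvPivotIter a (m + 1) hi
  else -1
termination_by (hi + 1 - lo).toNat
decreasing_by
  · have := PySem.Int.floordiv_two_mid_bounds (lo := lo) (hi := hi) hlh
    omega
  · have := PySem.Int.floordiv_two_mid_bounds (lo := lo) (hi := hi) hlh
    omega

-- Source B's two-pointer while i < j loop over logical positions
def pvLoopB (a : List Int) (s n p : Int) (i j : Int) : Int × Int :=
  if hij : i < j then
    let li := PySem.Int.mod (p + 1 + i) n
    let rj := PySem.Int.mod (p + 1 + j) n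
    let t := PySem.List.pyGetD a li 0 + PySem.List.pyGetD a rj 0
    if t = s then (li, rj)
    else if t < s then pvLoopB a s n p (i + 1) j
    else pvLoopB a s n p i (j - 1)
  else (-1, -1)
termination_by (j - i).toNat
decreasing_by
  · omega
  · omega

def findPairSum_alt (a : List Int) (s : Int) : Int × Int :=
  let n : Int := a.length
  let p := pvPivotIter a 0 (n - 1)
  pvLoopB a s n p 0 (n - 1)

-- ===== PRECONDITION & SPEC =====
-- Pre_ excludes only the empty list, on which A raises ZeroDivisionError (pivot % 0).
def Pre_findPairSum (a : List Int) (s : Int) : Prop := a ≠ []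
instance (a : List Int) (s : Int) : Decidable (Pre_findPairSum a s) := by
  unfold Pre_findPairSum; infer_instance

def pvWitness_findPairSum : List Int × Int := ([3, 4, 1, 2], 5)

def Spec_findPairSum (a : List Int) (s : Int) (out : Int × Int) : Prop := out = findPairSum_alt a s
instance (a : List Int) (s : Int) (out : Int × Int) : Decidable (Spec_findPairSum a s out) := by
  unfold Spec_findPairSum; infer_instance

-- ===== CLAIM (what is proved, stated in full; the proofs are below) =====
def Claim_equal_findPairSum : Prop := ∀ (a : List Int) (s : Int), Dom_findPairSum a s → Pre_findPairSum a s → Spec_findPairSum a s (findPairSum a s)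

-- ===== LEMMAS AND PROOFS =====

-- the two pivot searches run the identical recurrence
theorem pivotIter_eq_aux (a : List Int) :
    ∀ (N : Nat) (lo hi : Int), (hi + 1 - lo).toNat ≤ N →
      pvPivotIter a lo hi = pvFindPivot a lo hi := by
  intro N
  induction N with
  | zero =>
      intro lo hi hN
      rw [pvPivotIter, pvFindPivot]
      have hgt : ¬ lo ≤ hi := by omega
      simp only [dif_neg hgt, dif_pos (show lo > hi by omega)]
  | succ N ih =>
      intro lo hi hN
      rw [pvPivotIter, pvFindPivot]
      by_cases hle : lo ≤ hi
      · have hmid := PySem.Int.floordiv_two_mid_bounds (lo := lo) (hi := hi) hle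
        simp only [dif_pos hle, dif_neg (show ¬ lo > hi by omega)]
        split_ifs with h1 h2 h3
        · rfl
        · rfl
        · exact ih lo (PySem.Int.floordiv (lo + hi) 2 - 1) (by omega)
        · exact ih (PySem.Int.floordiv (lo + hi) 2 + 1) hi (by omega)
      · simp only [dif_neg hle, dif_pos (show lo > hi by omega)]

theorem pivotIter_eq (a : List Int) (lo hi : Int) :
    pvPivotIter a lo hi = pvFindPivot a lo hi :=
  pivotIter_eq_aux a (hi + 1 - lo).toNat lo hi le_rfl

-- the pivot A computes is -1 or an index in [0, r-1]
theorem pivot_range_aux (a : List Int) :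
    ∀ (N : Nat) (l r : Int), (r + 1 - l).toNat ≤ N → 0 ≤ l →
      pvFindPivot a l r = -1 ∨ (0 ≤ pvFindPivot a l r ∧ pvFindPivot a l r ≤ r - 1) := by
  intro N
  induction N with
  | zero =>
      intro l r hN hl
      rw [pvFindPivot]
      simp only [dif_pos (show l > r by omega)]
      simp
  | succ N ih =>
      intro l r hN hl
      rw [pvFindPivot]
      by_cases hgt : l > r
      · simp only [dif_pos hgt]; simp
      · have hmid := PySem.Int.floordiv_two_mid_bounds (lo := l) (hi := r) (by omega)
        simp only [dif_neg hgt]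
        split_ifs with h1 h2 h3
        · right; omega
        · right; omega
        · rcases ih l (PySem.Int.floordiv (l + r) 2 - 1) (by omega) hl with h' | h' <;> omega
        · rcases ih (PySem.Int.floordiv (l + r) 2 + 1) r (by omega) (by omega) with h' | h' <;> omega

theorem pivot_range (a : List Int) (l r : Int) (hl : 0 ≤ l) :
    pvFindPivot a l r = -1 ∨ (0 ≤ pvFindPivot a l r ∧ pvFindPivot a l r ≤ r - 1) :=
  pivot_range_aux a (r + 1 - l).toNat l r le_rfl hl

theorem emod_step_add (n x : Int) : (x % n + 1) % n = (x + 1) % n := by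
  rw [Int.add_emod (x % n) 1 n, Int.emod_emod_of_dvd _ dvd_rfl, ← Int.add_emod]

theorem emod_step_sub (n x : Int) : (x % n - 1) % n = (x - 1) % n := by
  rw [Int.sub_emod (x % n) 1 n, Int.emod_emod_of_dvd _ dvd_rfl, ← Int.sub_emod]

theorem emod_inj (n p i j : Int) (hn : 0 < n) (hi : 0 ≤ i) (hij : i ≤ j) (hj : j < n) :
    ((p + 1 + i) % n = (p + 1 + j) % n ↔ i = j) := by
  constructor
  · intro h
    have h0 : (p + 1 + i - (p + 1 + j)) % n = 0 :=
      Int.emod_eq_emod_iff_emod_sub_eq_zero.mp h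
    have h1 : (i - j) % n = 0 := by
      have e : p + 1 + i - (p + 1 + j) = i - j := by ring
      rwa [e] at h0
    obtain ⟨k, hk⟩ := Int.dvd_of_emod_eq_zero h1
    have hk0 : k = 0 := by
      rcases lt_trichotomy k 0 with hkk | hkk | hkk
      · have h2 : n * k ≤ n * (-1) := mul_le_mul_of_nonneg_left (by omega) (by omega)
        have h3 : n * (-1) = -n := by ring
        omega
      · exact hkk
      · have h2 : n * 1 ≤ n * k := mul_le_mul_of_nonneg_left (by omega) (by omega)
        have h3 : n * 1 = n := by ring
        omega
    rw [hk0, mul_zero] at hk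
    omega
  · intro h; rw [h]

-- the two while loops agree: A's (l, r) is B's (i, j) seen through the index map
theorem loop_eq (a : List Int) (s n p : Int) (hn : 0 < n) :
    ∀ (fuel : Nat) (i j : Int), 0 ≤ i → i ≤ j → j < n → j - i ≤ (fuel : Int) →
      pvLoopA a s n fuel (PySem.Int.mod (p + 1 + i) n) (PySem.Int.mod (p + 1 + j) n)
        = pvLoopB a s n p i j := by
  intro fuel
  induction fuel with
  | zero =>
      intro i j hi hij hj hfuel
      have hij : i = j := by omega
      subst hij
      rw [pvLoopB]
      simp [pvLoopA]
  | succ fuel ih =>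
      intro i j hi hij hj hfuel
      rw [pvLoopA, pvLoopB]
      by_cases hij' : i < j
      · have hne : PySem.Int.mod (p + 1 + i) n ≠ PySem.Int.mod (p + 1 + j) n := by
          rw [PySem.Int.mod_eq_emod_of_pos hn, PySem.Int.mod_eq_emod_of_pos hn]
          exact fun h => absurd ((emod_inj n p i j hn hi hij hj).mp h) (by omega)
        simp only [dif_pos hij', if_pos hne]
        split_ifs with h1 h2
        · rfl
        · have hrec := ih (i + 1) j (by omega) (by omega) hj (by omega)
          rw [← hrec]
          simp only [PySem.Int.mod_eq_emod_of_pos hn]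
          rw [emod_step_add]
          have e : p + 1 + i + 1 = p + 1 + (i + 1) := by ring
          rw [e]
        · have hrec := ih i (j - 1) hi (by omega) (by omega) (by omega)
          rw [← hrec]
          simp only [PySem.Int.mod_eq_emod_of_pos hn]
          rw [emod_step_sub]
          have e : p + 1 + j - 1 = p + 1 + (j - 1) := by ring
          rw [e]
      · have hij2 : i = j := by omega
        subst hij2
        simp

-- ===== VERDICT (by name: the statement is the Claim_ definition above) =====
theorem findPairSum_spec : Claim_equal_findPairSum := by
  intro a s _hdom hpre
  unfold Spec_findPairSum findPairSum findPairSum_alt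
  have hn : 0 < (a.length : Int) := by
    have := List.length_pos_of_ne_nil hpre
    omega
  show pvLoopA a s (a.length : Int) a.length
      (pvFindPivot a 0 ((a.length : Int) - 1) + 1)
      (PySem.Int.mod (pvFindPivot a 0 ((a.length : Int) - 1)) (a.length : Int))
    = pvLoopB a s (a.length : Int) (pvPivotIter a 0 ((a.length : Int) - 1)) 0 ((a.length : Int) - 1)
  rw [pivotIter_eq]
  set n : Int := (a.length : Int) with hn_def
  set p := pvFindPivot a 0 (n - 1) with hp_def
  have hrange := pivot_range a 0 (n - 1) le_rfl
  rw [← hp_def] at hrange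
  have hp1 : 0 ≤ p + 1 ∧ p + 1 < n := by omega
  have e1 : p + 1 = PySem.Int.mod (p + 1 + 0) n := by
    rw [PySem.Int.mod_eq_emod_of_pos hn, add_zero, Int.emod_eq_of_lt hp1.1 hp1.2]
  have e2 : PySem.Int.mod p n = PySem.Int.mod (p + 1 + (n - 1)) n := by
    rw [PySem.Int.mod_eq_emod_of_pos hn, PySem.Int.mod_eq_emod_of_pos hn]
    have e : p + 1 + (n - 1) = p + n := by ring
    rw [e, Int.add_emod_right]
  rw [e1, e2]
  have hfuel : (n - 1) - 0 ≤ (a.length : Int) := by omega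
  exact loop_eq a s n p hn a.length 0 (n - 1) le_rfl (by omega) (by omega) hfuel
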